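-- pv_equiv track=rewrite | github.com/bjtu-hospital/hospital-backend | backend/scripts/backfill_risk_from_sql.py | _tokenize_values
-- ===== SOURCE A (Python) =====
-- from typing import Dict, List, Optional, Tuple
--
-- def _tokenize_values(values_raw: str) -> List[List[str]]:
--     """Tokenize VALUES section into list of row token lists.
--     Handles commas inside quoted strings and NULL.
--     """
--     rows: List[List[str]] = []
--     i = 0
--     n = len(values_raw)
--     def parse_one_tuple(start: int) -> Tuple[List[str], int]:
--         assert values_raw[start] == '(', "tuple must start with ("
--         i = start + 1
--         cur = ''
--         in_str = False
--         esc = False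
--         tokens: List[str] = []
--         while i < n:
--             ch = values_raw[i]
--             if in_str:
--                 if esc:
--                     cur += ch
--                     esc = False
--                 elif ch == "\\":
--                     esc = True
--                 elif ch == "'":
--                     in_str = False
--                 else:
--                     cur += ch
--                 i += 1
--                 continue
--             else:
--                 if ch == "'":
--                     in_str = True
--                     i += 1
--                     continue
--                 if ch == ",":
--                     tokens.append(cur.strip())
--                     cur = ''
--                     i += 1
--                     continue
--                 if ch == ")":
--                     tokens.append(cur.strip())
--                     i += 1
--                     break
--                 # regular char
--                 cur += ch
--                 i += 1
--         # skip trailing spaces and comma between tuples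
--         while i < n and values_raw[i] in (' ', '\n', '\r', '\t'):
--             i += 1
--         if i < n and values_raw[i] == ',':
--             i += 1
--         return tokens, i
--
--     while i < n:
--         # skip whitespace and commas
--         while i < n and values_raw[i] in (' ', '\n', '\r', '\t', ','):
--             i += 1
--         if i >= n:
--             break
--         if values_raw[i] != '(':
--             # malformed; stop
--             break
--         toks, i = parse_one_tuple(i)
--         rows.append(toks)
--     return rows
-- ===== SOURCE B (Python) =====
-- def _tokenize_values(values_raw):
--     """Single flat state machine over the characters; no inner helper, no index math."""
--     rows = []
--     mode = 0           # 0: outside a tuple, 1: inside a tuple, 2: stopped (malformed)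
--     in_str = False
--     esc = False
--     cur = []
--     tokens = []
--     for ch in values_raw:
--         if mode == 2:
--             continue
--         if mode == 0:
--             if ch in ' \n\r\t,':
--                 continue
--             if ch != '(':
--                 mode = 2
--                 continue
--             mode = 1
--             in_str = False
--             esc = False
--             cur = []
--             tokens = []
--         else:
--             if in_str:
--                 if esc:
--                     cur.append(ch)
--                     esc = False
--                 elif ch == '\\':
--                     esc = True
--                 elif ch == "'":
--                     in_str = False
--                 else:
--                     cur.append(ch)
--             elif ch == "'":
--                 in_str = True
--             elif ch == ',':
--                 tokens.append(''.join(cur).strip())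
--                 cur = []
--             elif ch == ')':
--                 tokens.append(''.join(cur).strip())
--                 rows.append(tokens)
--                 tokens = []
--                 cur = []
--                 mode = 0
--             else:
--                 cur.append(ch)
--     if mode == 1:
--         rows.append(tokens)
--     return rows
-- ===== Notes on version B (the rewrite author's own statement) =====
-- stated objective: simpler
-- what changed: Collapsed the nested parse_one_tuple helper and index-based outer loop into one flat for-loop over the characters with an explicit mode (outside/inside/stopped) and in_str/esc sub-state, so there is no index arithmetic and no inner function.
import Mathlib
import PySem

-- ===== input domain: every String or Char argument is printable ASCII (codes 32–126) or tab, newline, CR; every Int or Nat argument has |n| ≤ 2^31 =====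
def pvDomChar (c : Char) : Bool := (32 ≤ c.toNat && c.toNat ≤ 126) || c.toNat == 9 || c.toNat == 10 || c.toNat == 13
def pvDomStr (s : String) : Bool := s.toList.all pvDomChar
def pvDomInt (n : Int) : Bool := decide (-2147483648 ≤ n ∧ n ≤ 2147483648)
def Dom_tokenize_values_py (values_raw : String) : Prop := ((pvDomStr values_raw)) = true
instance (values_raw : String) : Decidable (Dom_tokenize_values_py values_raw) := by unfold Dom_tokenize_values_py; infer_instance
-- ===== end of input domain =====

-- B replaces A's nested parse_one_tuple helper + index-based outer loop by a single flat
-- state-machine pass over the characters (objective: simpler decomposition, same O(n) cost).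

-- ===== PORT A =====
-- A walks the string by index; we port the index walk as structural consumption of the char-list suffix.
def pvIsWsA (c : Char) : Bool := c = ' ' || c = '\n' || c = '\r' || c = '\t'

-- the `while i < n` loop of parse_one_tuple (state: i-suffix, cur, in_str, esc, tokens)
def parseInsideA (cs : List Char) (cur : List Char) (inStr esc : Bool) (tokens : List String) :
    List String × List Char :=
  match cs with
  | [] => (tokens, [])
  | ch :: rest =>
    if inStr then
      if esc then parseInsideA rest (cur ++ [ch]) inStr false tokens
      else if ch = '\\' then parseInsideA rest cur inStr true tokens
      else if ch = '\'' then parseInsideA rest cur false esc tokens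
      else parseInsideA rest (cur ++ [ch]) inStr esc tokens
    else
      if ch = '\'' then parseInsideA rest cur true esc tokens
      else if ch = ',' then
        parseInsideA rest [] inStr esc (tokens ++ [String.ofList (PySem.Chars.strip cur)])
      else if ch = ')' then (tokens ++ [String.ofList (PySem.Chars.strip cur)], rest)
      else parseInsideA rest (cur ++ [ch]) inStr esc tokens

-- parse_one_tuple: the inner loop, then skip trailing whitespace and one optional comma
def parseOneTupleA (cs : List Char) : List String × List Char :=
  let p := parseInsideA cs [] false false []
  let r := p.2.dropWhile pvIsWsA
  let r2 := match r with
    | ',' :: t => t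
    | _ => r
  (p.1, r2)

-- needed by outerA's termination: parse_one_tuple only consumes characters
theorem parseInsideA_snd_le (cs : List Char) (cur : List Char) (inStr esc : Bool)
    (tokens : List String) : (parseInsideA cs cur inStr esc tokens).2.length ≤ cs.length := by
  fun_induction parseInsideA cs cur inStr esc tokens <;> simp_all <;> omega

theorem parseOneTupleA_snd_le (cs : List Char) : (parseOneTupleA cs).2.length ≤ cs.length := by
  have h1 := parseInsideA_snd_le cs [] false false []
  have h2 := List.length_dropWhile_le pvIsWsA (parseInsideA cs [] false false []).2
  have key : (parseOneTupleA cs).2.length ≤ (parseInsideA cs [] false false []).2.length := by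
    simp only [parseOneTupleA]
    split
    · rename_i t ht
      have := congrArg List.length ht
      simp at this; omega
    · exact h2
  omega

-- the outer `while i < n` loop of _tokenize_values
def outerA (cs : List Char) (rows : List (List String)) : List (List String) :=
  match cs with
  | [] => rows
  | c :: rest =>
    if pvIsWsA c || c = ',' then outerA rest rows
    else if c ≠ '(' then rows
    else outerA (parseOneTupleA rest).2 (rows ++ [(parseOneTupleA rest).1])
termination_by cs.length
decreasing_by
  all_goals simp
  have := parseOneTupleA_snd_le rest; omega

def tokenize_values_py (values_raw : String) : List (List String) :=
  outerA values_raw.toList []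

-- ===== PORT B =====
structure PvStB where
  rows : List (List String)
  mode : Nat
  inStr : Bool
  esc : Bool
  cur : List Char
  tokens : List String
deriving Repr, DecidableEq

def pvStepB (st : PvStB) (ch : Char) : PvStB :=
  if st.mode = 2 then st
  else if st.mode = 0 then
    if pvIsWsA ch || ch = ',' then st
    else if ch ≠ '(' then { st with mode := 2 }
    else { st with mode := 1, inStr := false, esc := false, cur := [], tokens := [] }
  else
    if st.inStr then
      if st.esc then { st with cur := st.cur ++ [ch], esc := false }
      else if ch = '\\' then { st with esc := true }
      else if ch = '\'' then { st with inStr := false }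
      else { st with cur := st.cur ++ [ch] }
    else if ch = '\'' then { st with inStr := true }
    else if ch = ',' then
      { st with tokens := st.tokens ++ [String.ofList (PySem.Chars.strip st.cur)], cur := [] }
    else if ch = ')' then
      { st with rows := st.rows ++ [st.tokens ++ [String.ofList (PySem.Chars.strip st.cur)]],
                tokens := [], cur := [], mode := 0 }
    else { st with cur := st.cur ++ [ch] }

def pvFinishB (st : PvStB) : List (List String) :=
  if st.mode = 1 then st.rows ++ [st.tokens] else st.rows

def tokenize_values_py_alt (values_raw : String) : List (List String) :=
  pvFinishB (values_raw.toList.foldl pvStepB ⟨[], 0, false, false, [], []⟩)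

-- ===== PRECONDITION & SPEC =====
def Spec_tokenize_values_py (values_raw : String) (out : List (List String)) : Prop := out = tokenize_values_py_alt values_raw
instance (values_raw : String) (out : List (List String)) : Decidable (Spec_tokenize_values_py values_raw out) := by unfold Spec_tokenize_values_py; infer_instance

-- ===== CLAIM (what is proved, stated in full; the proofs are below) =====
def Claim_equal_tokenize_values_py : Prop := ∀ (values_raw : String), Dom_tokenize_values_py values_raw → Spec_tokenize_values_py values_raw (tokenize_values_py values_raw)

-- ===== LEMMAS AND PROOFS =====

-- controlled unfoldings of B's step function, one per mode
theorem stepB_mode0 (rows : List (List String)) (a b : Bool) (c : List Char) (d : List String)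
    (ch : Char) :
    pvStepB ⟨rows, 0, a, b, c, d⟩ ch =
      if pvIsWsA ch || ch = ',' then ⟨rows, 0, a, b, c, d⟩
      else if ch ≠ '(' then ⟨rows, 2, a, b, c, d⟩
      else ⟨rows, 1, false, false, [], []⟩ := by
  simp [pvStepB]

theorem stepB_mode1 (rows : List (List String)) (a b : Bool) (c : List Char) (d : List String)
    (ch : Char) :
    pvStepB ⟨rows, 1, a, b, c, d⟩ ch =
      if a then
        if b then ⟨rows, 1, a, false, c ++ [ch], d⟩
        else if ch = '\\' then ⟨rows, 1, a, true, c, d⟩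
        else if ch = '\'' then ⟨rows, 1, false, b, c, d⟩
        else ⟨rows, 1, a, b, c ++ [ch], d⟩
      else if ch = '\'' then ⟨rows, 1, true, b, c, d⟩
      else if ch = ',' then ⟨rows, 1, a, b, [], d ++ [String.ofList (PySem.Chars.strip c)]⟩
      else if ch = ')' then ⟨rows ++ [d ++ [String.ofList (PySem.Chars.strip c)]], 0, a, b, [], []⟩
      else ⟨rows, 1, a, b, c ++ [ch], d⟩ := by
  simp [pvStepB]

theorem stepB_mode2 (rows : List (List String)) (a b : Bool) (c : List Char) (d : List String)
    (ch : Char) : pvStepB ⟨rows, 2, a, b, c, d⟩ ch = ⟨rows, 2, a, b, c, d⟩ := by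
  simp [pvStepB]

-- once B's machine has stopped (mode 2), nothing changes
theorem foldB_mode2 (cs : List Char) (rows : List (List String)) (a b : Bool) (c : List Char)
    (d : List String) : cs.foldl pvStepB ⟨rows, 2, a, b, c, d⟩ = ⟨rows, 2, a, b, c, d⟩ := by
  induction cs with
  | nil => rfl
  | cons ch t ih => rw [List.foldl_cons, stepB_mode2]; exact ih

-- in mode 0 the result is independent of the string/token scratch fields
theorem foldB_mode0_irrel (cs : List Char) (rows : List (List String))
    (a b : Bool) (c : List Char) (d : List String) (a' b' : Bool) (c' : List Char) (d' : List String) :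
    pvFinishB (cs.foldl pvStepB ⟨rows, 0, a, b, c, d⟩)
      = pvFinishB (cs.foldl pvStepB ⟨rows, 0, a', b', c', d'⟩) := by
  induction cs generalizing rows with
  | nil => simp [pvFinishB]
  | cons ch t ih =>
    rw [List.foldl_cons, List.foldl_cons, stepB_mode0, stepB_mode0]
    by_cases hskip : (pvIsWsA ch || ch = ',') = true
    · rw [if_pos hskip, if_pos hskip]; exact ih rows
    · rw [if_neg hskip, if_neg hskip]
      by_cases hpar : ch = '('
      · simp [hpar]
      · rw [if_pos (by simpa using hpar), if_pos (by simpa using hpar),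
          foldB_mode2, foldB_mode2]
        simp [pvFinishB]

-- folding B from an inside-tuple state equals running A's inner loop, then continuing in mode 0
theorem foldB_inside (cs : List Char) (cur : List Char) (inStr esc : Bool)
    (tokens : List String) (rows : List (List String)) :
    pvFinishB (cs.foldl pvStepB ⟨rows, 1, inStr, esc, cur, tokens⟩)
      = pvFinishB ((parseInsideA cs cur inStr esc tokens).2.foldl pvStepB
          ⟨rows ++ [(parseInsideA cs cur inStr esc tokens).1], 0, false, false, [], []⟩) := by
  induction cs generalizing cur inStr esc tokens rows with
  | nil => simp [parseInsideA, pvFinishB]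
  | cons ch rest ih =>
    rw [List.foldl_cons, stepB_mode1]
    by_cases hs : inStr
    · by_cases he : esc
      · simp only [parseInsideA, hs, he, if_pos rfl, if_true]; exact ih ..
      · by_cases h1 : ch = '\\'
        · simp only [parseInsideA, hs, he, h1, Bool.false_eq_true, if_false, if_pos rfl, if_true]
          exact ih ..
        · by_cases h2 : ch = '\''
          · simp only [parseInsideA, hs, he, h1, h2, Bool.false_eq_true, if_false, if_true,
              if_pos rfl, if_neg (by simpa using h1)]
            exact ih ..
          · simp only [parseInsideA, hs, he, h1, h2, Bool.false_eq_true, if_false, if_true,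
              if_neg (by simpa using h1), if_neg (by simpa using h2)]
            exact ih ..
    · by_cases h2 : ch = '\''
      · simp only [parseInsideA, hs, h2, Bool.false_eq_true, if_false, if_pos rfl]
        exact ih ..
      · by_cases h3 : ch = ','
        · simp only [parseInsideA, hs, h2, h3, Bool.false_eq_true, if_false,
            if_neg (by simpa using h2), if_pos rfl]
          exact ih ..
        · by_cases h4 : ch = ')'
          · simp only [parseInsideA, hs, h2, h3, h4, Bool.false_eq_true, if_false,
              if_neg (by simpa using h2), if_neg (by simpa using h3), if_pos rfl]
            exact foldB_mode0_irrel ..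
          · simp only [parseInsideA, hs, h2, h3, h4, Bool.false_eq_true, if_false,
              if_neg (by simpa using h2), if_neg (by simpa using h3), if_neg (by simpa using h4)]
            exact ih ..

-- A's outer loop skips whitespace characters
theorem outerA_dropWhile (cs : List Char) (rows : List (List String)) :
    outerA cs rows = outerA (cs.dropWhile pvIsWsA) rows := by
  induction cs with
  | nil => rfl
  | cons c t ih =>
    by_cases h : pvIsWsA c
    · rw [outerA, List.dropWhile_cons_of_pos h]; simp [h, ih]
    · rw [List.dropWhile_cons_of_neg h]

-- A's outer loop skips a comma
theorem outerA_comma (t : List Char) (rows : List (List String)) :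
    outerA (',' :: t) rows = outerA t rows := by
  rw [outerA]; simp

-- hence A's outer loop does not care about parse_one_tuple's trailing-separator skipping
theorem outerA_skip_sep (cs : List Char) (rows : List (List String)) :
    outerA cs rows
      = outerA (match cs.dropWhile pvIsWsA with
                | ',' :: t => t
                | _ => cs.dropWhile pvIsWsA) rows := by
  rw [outerA_dropWhile]
  split
  · rename_i t heq; rw [heq, outerA_comma]
  · rfl

-- main correspondence: B's fold from the outside state computes A's outer loop
theorem foldB_eq_outerA (n : Nat) : ∀ (cs : List Char) (rows : List (List String)),
    cs.length ≤ n →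
    pvFinishB (cs.foldl pvStepB ⟨rows, 0, false, false, [], []⟩) = outerA cs rows := by
  induction n with
  | zero =>
    intro cs rows h
    have : cs = [] := List.eq_nil_of_length_eq_zero (Nat.le_zero.mp h)
    subst this; simp [pvFinishB, outerA]
  | succ n ih =>
    intro cs rows h
    match cs with
    | [] => simp [pvFinishB, outerA]
    | c :: rest =>
      simp only [List.length_cons, Nat.succ_le_succ_iff] at h
      rw [List.foldl_cons, stepB_mode0, outerA]
      by_cases hskip : (pvIsWsA c || c = ',') = true
      · rw [if_pos hskip]; simp only [hskip, if_true]
        exact ih rest rows h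
      · rw [if_neg hskip]; simp only [hskip, Bool.false_eq_true, if_false]
        by_cases hpar : c = '('
        · rw [if_neg (by simpa using hpar)]
          simp only [hpar, ne_eq, not_true_eq_false, if_false]
          rw [foldB_inside]
          have hle : (parseInsideA rest [] false false []).2.length ≤ n :=
            le_trans (parseInsideA_snd_le ..) h
          rw [ih _ _ hle]
          show _ = outerA (parseOneTupleA rest).2 (rows ++ [(parseOneTupleA rest).1])
          simp only [parseOneTupleA]
          exact outerA_skip_sep (parseInsideA rest [] false false []).2 _
        · rw [if_pos (by simpa using hpar), foldB_mode2]
          simp only [hpar, ne_eq, not_false_eq_true, if_true, pvFinishB]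
          simp
  -- end

-- ===== VERDICT (by name: the statement is the Claim_ definition above) =====
theorem tokenize_values_py_spec : Claim_equal_tokenize_values_py := by
  intro values_raw _
  unfold Spec_tokenize_values_py tokenize_values_py tokenize_values_py_alt
  exact (foldB_eq_outerA values_raw.toList.length values_raw.toList [] le_rfl).symm
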